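-- pv_equiv track=rewrite | github.com/lmiksch/CoFPT | functions/convert_functions.py | only_b_domainfp
-- ===== SOURCE A (Python) =====
-- def only_b_domainfp(seq,path):
--     """Takes a seq and the extended folding path only returns the folding path of only the b domains
--
--     Args:
--         seq(list): sequence in form of a list where each entry in the list corresponds to one module
--         path(list): module folding path in form of a list where each entry corresponds to one module being transcribed
--
--     """
--     b_domainfp = [[] for x in path]
--
--
--     for x in range(len(path)):
--
--         for y in range(len(path[x][0])):
--
--             if seq[y] == "b" or seq[y] == "B":
--
--                 b_domainfp[x].append(path[x][0][y])
--
--     for x in range(len(b_domainfp)):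
--         b_domainfp[x] = "".join(b_domainfp[x])
--     return b_domainfp
-- ===== SOURCE B (Python) =====
-- def only_b_domainfp(seq, path):
--     """Takes a seq and the extended folding path only returns the folding path of only the b domains"""
--     b_idx = [y for y in range(len(seq)) if seq[y] == "b" or seq[y] == "B"]
--     out = []
--     for mod in path:
--         first = mod[0]
--         L = len(first)
--         out.append("".join(first[y] for y in b_idx if y < L))
--     return out
-- ===== Notes on version B (the rewrite author's own statement) =====
-- stated objective: alternative
-- what changed: B precomputes the index table of b/B positions in seq once and, per module, joins just those positions (filtered to the module's length), instead of A's mutable per-module list re-testing seq[y] at every position.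
import Mathlib
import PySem

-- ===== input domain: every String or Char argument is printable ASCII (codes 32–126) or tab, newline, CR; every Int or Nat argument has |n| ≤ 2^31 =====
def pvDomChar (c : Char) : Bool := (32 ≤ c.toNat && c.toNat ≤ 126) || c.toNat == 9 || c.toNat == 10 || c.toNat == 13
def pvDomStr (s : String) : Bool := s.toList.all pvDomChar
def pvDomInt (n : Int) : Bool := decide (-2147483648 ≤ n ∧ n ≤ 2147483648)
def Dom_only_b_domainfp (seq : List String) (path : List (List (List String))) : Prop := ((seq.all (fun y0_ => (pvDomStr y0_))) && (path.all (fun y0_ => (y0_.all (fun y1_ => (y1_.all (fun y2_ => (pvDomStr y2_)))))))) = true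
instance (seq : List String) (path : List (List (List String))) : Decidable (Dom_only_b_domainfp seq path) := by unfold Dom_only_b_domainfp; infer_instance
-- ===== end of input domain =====

-- B precomputes the b/B index table of seq once and joins those positions per module (alternative decomposition, same cost).


-- ===== PORT A =====
def only_b_domainfp (seq : List String) (path : List (List (List String))) : List String :=
  let b_domainfp : List (List String) :=
    (List.range path.length).map (fun (x : Nat) =>
      (List.range (PySem.List.pyGetD (PySem.List.pyGetD path (x : Int) []) 0 []).length).foldl
        (fun acc (y : Nat) =>
          if PySem.List.pyGetD seq (y : Int) "" = "b" ∨ PySem.List.pyGetD seq (y : Int) "" = "B" then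
            acc ++ [PySem.List.pyGetD (PySem.List.pyGetD (PySem.List.pyGetD path (x : Int) []) 0 []) (y : Int) ""]
          else acc) [])
  b_domainfp.map (fun l => PySem.Str.join "" l)

-- ===== PORT B =====
def only_b_domainfp_alt (seq : List String) (path : List (List (List String))) : List String :=
  let bIdx : List Nat :=
    (List.range seq.length).filter (fun (y : Nat) =>
      PySem.List.pyGetD seq (y : Int) "" = "b" ∨ PySem.List.pyGetD seq (y : Int) "" = "B")
  path.map (fun mod =>
    let first := PySem.List.pyGetD mod 0 []
    let L := first.length
    PySem.Str.join "" ((bIdx.filter (fun y => y < L)).map (fun (y : Nat) => PySem.List.pyGetD first (y : Int) "")))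

-- ===== PRECONDITION & SPEC =====
-- Pre_ excludes exactly the inputs on which A raises IndexError: a module with an empty path list
-- (path[x][0]), or a module whose first path entry is longer than seq (seq[y]).
def Pre_only_b_domainfp (seq : List String) (path : List (List (List String))) : Prop :=
  ∀ mod ∈ path, mod ≠ [] ∧ (PySem.List.pyGetD mod 0 []).length ≤ seq.length
instance (seq : List String) (path : List (List (List String))) : Decidable (Pre_only_b_domainfp seq path) := by unfold Pre_only_b_domainfp; infer_instance

def pvWitness_only_b_domainfp : List String × List (List (List String)) :=
  (["a", "b", "c", "B"], [[["x", "y", "z", "w"]], [["p", "q"]]])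

def Spec_only_b_domainfp (seq : List String) (path : List (List (List String))) (out : List String) : Prop := out = only_b_domainfp_alt seq path
instance (seq : List String) (path : List (List (List String))) (out : List String) : Decidable (Spec_only_b_domainfp seq path out) := by unfold Spec_only_b_domainfp; infer_instance

-- ===== CLAIM (what is proved, stated in full; the proofs are below) =====
def Claim_equal_only_b_domainfp : Prop := ∀ (seq : List String) (path : List (List (List String))), Dom_only_b_domainfp seq path → Pre_only_b_domainfp seq path → Spec_only_b_domainfp seq path (only_b_domainfp seq path)

-- ===== LEMMAS AND PROOFS =====

-- restricting a filtered range: keeping only the indices below L of range n is range L (for L ≤ n)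
lemma filter_lt_filter_range (n L : Nat) (p : Nat → Bool) (h : L ≤ n) :
    ((List.range n).filter p).filter (fun y => y < L) = (List.range L).filter p := by
  obtain ⟨k, rfl⟩ := Nat.exists_eq_add_of_le h
  rw [List.range_add, List.filter_append, List.filter_append]
  have h1 : ((List.range L).filter p).filter (fun y => y < L) = (List.range L).filter p := by
    apply List.filter_eq_self.mpr
    intro a ha
    have := List.mem_range.mp (List.mem_of_mem_filter ha)
    simpa using this
  have h2 : (((List.range k).map (L + ·)).filter p).filter (fun y => y < L) = [] := by
    apply List.filter_eq_nil_iff.mpr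
    intro a ha
    have ha' := List.mem_of_mem_filter ha
    obtain ⟨b, _, rfl⟩ := List.mem_map.mp ha'
    simp
  rw [h1, h2, List.append_nil]

-- ===== VERDICT (by name: the statement is the Claim_ definition above) =====
theorem only_b_domainfp_spec : Claim_equal_only_b_domainfp := by
  intro seq path _ hpre
  unfold Spec_only_b_domainfp only_b_domainfp only_b_domainfp_alt
  
  apply List.ext_getElem
  · simp
  · intro i h1 h2
    simp only [List.getElem_map, List.getElem_range]
    have hi : i < path.length := by simpa using h1
    have hmem : path[i] ∈ path := List.getElem_mem hi
    obtain ⟨hne, hle⟩ := hpre _ hmem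
    have hpi : PySem.List.pyGetD path (i : Int) [] = path[i] := by
      simp [PySem.List.pyGetD_natCast, List.getD_eq_getElem?_getD, hi]
    rw [hpi]
    congr 1
    rw [filter_lt_filter_range _ _ _ hle]
    simpa using PySem.List.foldl_append_if
      (fun (y : Nat) => decide (PySem.List.pyGetD seq (y : Int) "" = "b" ∨ PySem.List.pyGetD seq (y : Int) "" = "B"))
      (fun (y : Nat) => PySem.List.pyGetD (PySem.List.pyGetD path[i] 0 []) (y : Int) "")
      (List.range (PySem.List.pyGetD path[i] 0 []).length) []
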